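-- pv_equiv track=rewrite | github.com/aszkiel71/uwr | informatyka [computer science]/[24-W] Wstep do pythona/eleventh_list/task2.py | permutation_normal_form
-- ===== SOURCE A (Python) =====
-- def permutation_normal_form(s):
--     opted = []
--     dict = {}
--     counter = 1
--     for i in s:
--         if i not in opted:
--             opted.append(i)
--             dict[i] = counter
--             counter += 1
--     result = ''
--     for i in s:
--         result += str(dict[i])
--         result += "-"
--     return result[:len(result) - 1]
-- ===== SOURCE B (Python) =====
-- def permutation_normal_form(s):
--     return '-'.join(str(len(set(s[:s.index(c) + 1]))) for c in s)
-- ===== Notes on version B (the rewrite author's own statement) =====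
-- stated objective: alternative
-- what changed: B drops A's stateful rank table (opted list, dict, counter, two loops, trailing-dash trimming) entirely and computes each character's rank by a per-character closed form - the number of distinct characters in the prefix of s through that character's first occurrence, len(set(s[:s.index(c)+1])) - dash-joined.
import Mathlib
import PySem

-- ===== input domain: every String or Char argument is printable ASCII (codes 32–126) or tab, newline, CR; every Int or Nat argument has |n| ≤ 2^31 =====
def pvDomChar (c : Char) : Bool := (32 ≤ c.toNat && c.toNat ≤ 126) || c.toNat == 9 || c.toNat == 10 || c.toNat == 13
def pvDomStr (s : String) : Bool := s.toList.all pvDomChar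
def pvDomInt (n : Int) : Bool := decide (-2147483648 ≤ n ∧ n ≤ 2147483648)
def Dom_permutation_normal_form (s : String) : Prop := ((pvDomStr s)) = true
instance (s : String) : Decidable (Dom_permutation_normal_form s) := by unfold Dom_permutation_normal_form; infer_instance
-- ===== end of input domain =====

-- B replaces A's stateful two-loop rank table by a per-character closed form (rank of c = number of
-- distinct chars in the prefix of s through the first occurrence of c), dash-joined: no dict,
-- no counter, no trailing-dash trimming — a genuinely different (stateless) algorithm, not faster.

-- ===== PORT A =====
-- first loop of A: state (opted, dict, counter)
def pnfA_step (st : List Char × PySem.Dict Char Int × Int) (i : Char) :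
    List Char × PySem.Dict Char Int × Int :=
  if ¬ st.1.contains i then (st.1 ++ [i], st.2.1.insert i st.2.2, st.2.2 + 1) else st

def permutation_normal_form (s : String) : String :=
  let st := s.toList.foldl pnfA_step ([], PySem.Dict.empty, 1)
  -- dict[i]: the key is always present (inserted in the first loop), so getD's default is never used
  let result := s.toList.foldl
    (fun r i => (r ++ PySem.Int.toChars (st.2.1.getD i 0)) ++ ['-']) []
  String.ofList (PySem.List.slice result none (some ((result.length : Int) - 1)))

-- ===== PORT B =====
-- s.index(c): every c handed to it occurs in s, so ValueError is unreachable (getD's default unused)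
def pnfB_index (l : List Char) (c : Char) : Nat := (PySem.List.index? l c).getD 0

-- '-'.join(str(len(set(s[:s.index(c) + 1]))) for c in s)
def permutation_normal_form_alt (s : String) : String :=
  String.ofList (PySem.Chars.join ['-'] (s.toList.map (fun c =>
    PySem.Int.toChars (PySem.Set.len (PySem.Set.ofList
      (PySem.List.slice s.toList none (some ((pnfB_index s.toList c : Int) + 1))))))))

-- ===== PRECONDITION & SPEC =====
def Spec_permutation_normal_form (s : String) (out : String) : Prop := out = permutation_normal_form_alt s
instance (s : String) (out : String) : Decidable (Spec_permutation_normal_form s out) := by unfold Spec_permutation_normal_form; infer_instance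

-- ===== CLAIM (what is proved, stated in full; the proofs are below) =====
def Claim_equal_permutation_normal_form : Prop := ∀ (s : String), Dom_permutation_normal_form s → Spec_permutation_normal_form s (permutation_normal_form s)

-- ===== LEMMAS AND PROOFS =====

-- the dict evolution of A's first loop
def pstep (d : PySem.Dict Char Int) (c : Char) : PySem.Dict Char Int :=
  if ¬ d.contains c then d.insert c ((d.size : Int) + 1) else d

theorem contains_pstep (d : PySem.Dict Char Int) (a c : Char) (h : d.contains c = true) :
    (pstep d a).contains c = true := by
  unfold pstep
  split
  · simp [PySem.Dict.contains_insert, h]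
  · exact h

theorem get?_foldl_pstep_mono (l : List Char) (d : PySem.Dict Char Int) (c : Char)
    (h : d.contains c = true) : (l.foldl pstep d).get? c = d.get? c := by
  induction l generalizing d with
  | nil => rfl
  | cons a l ih =>
    simp only [List.foldl_cons]
    rw [ih (pstep d a) (contains_pstep d a c h)]
    unfold pstep
    split
    · rename_i hnc
      have hne : c ≠ a := by
        intro he; subst he; exact hnc h
      apply PySem.Dict.get?_insert_of_ne
      exact hne
    · rfl

-- A's first loop computes the same dict, under the invariant o ~ d.keys, counter = size+1
theorem pnfA_loop1_dict (l : List Char) (o : List Char) (d : PySem.Dict Char Int) (cnt : Int)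
    (ho : ∀ c, o.contains c = d.contains c) (hc : cnt = (d.size : Int) + 1) :
    (l.foldl pnfA_step (o, d, cnt)).2.1 = l.foldl pstep d := by
  induction l generalizing o d cnt with
  | nil => rfl
  | cons a l ih =>
    simp only [List.foldl_cons]
    by_cases h : d.contains a = true
    · have hoa : a ∈ o := by simpa using (ho a).trans h
      have e1 : pnfA_step (o, d, cnt) a = (o, d, cnt) := by
        simp [pnfA_step, hoa]
      have e2 : pstep d a = d := by simp [pstep, h]
      rw [e1, e2]
      exact ih o d cnt ho hc
    · have hfa : d.contains a = false := by simpa using h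
      have hoa : a ∉ o := by simpa using (ho a).trans hfa
      have h1 : pnfA_step (o, d, cnt) a = (o ++ [a], d.insert a cnt, cnt + 1) := by
        simp [pnfA_step, hoa]
      have h2 : pstep d a = d.insert a ((d.size : Int) + 1) := by simp [pstep, hfa]
      rw [h1, h2, ← hc]
      apply ih
      · intro c
        rw [PySem.Dict.contains_insert, ← ho c]
        by_cases hca : c = a
        · subst hca; simp
        · have e1 : (c == a) = false := by simp [hca]
          simp [e1, hca]
      · rw [PySem.Dict.size_insert, if_neg (by simp [hfa])]
        push_cast
        omega

-- skipping elements already present in the accumulating set does not change a Set.add fold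
theorem foldl_add_filter_mem (ys : List Char) (s : PySem.Set Char) (a : Char) (ha : a ∈ s) :
    ys.foldl PySem.Set.add s = (ys.filter (fun x => !(x == a))).foldl PySem.Set.add s := by
  induction ys generalizing s with
  | nil => rfl
  | cons x r ih =>
    by_cases hx : x = a
    · subst hx
      have hadd : PySem.Set.add s x = s := PySem.Set.add_of_mem ha
      simp only [List.foldl_cons, List.filter_cons, beq_self_eq_true, Bool.not_true, hadd]
      exact ih s ha
    · have hb : (!(x == a)) = true := by simp [hx]
      simp only [List.foldl_cons, List.filter_cons, hb, if_true]
      exact ih (PySem.Set.add s x) ((PySem.Set.mem_add s x a).2 (Or.inl ha))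

-- two accumulating sets that agree on the coming elements keep their length gap under a Set.add fold
theorem foldl_add_length (ys : List Char) : ∀ (s t : List Char), t.length = s.length + 1 →
    (∀ x ∈ ys, (x ∈ t ↔ x ∈ s)) →
    (ys.foldl PySem.Set.add t).length = (ys.foldl PySem.Set.add s).length + 1 := by
  induction ys with
  | nil => intro s t h _; exact h
  | cons x r ih =>
    intro s t hlen hmem
    have hx := hmem x (List.mem_cons_self ..)
    by_cases hs : x ∈ s
    · have ht : x ∈ t := hx.2 hs
      simp only [List.foldl_cons, PySem.Set.add_of_mem hs, PySem.Set.add_of_mem ht]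
      exact ih s t hlen (fun y hy => hmem y (List.mem_cons_of_mem _ hy))
    · have ht : x ∉ t := fun h => hs (hx.1 h)
      simp only [List.foldl_cons, PySem.Set.add_of_not_mem hs, PySem.Set.add_of_not_mem ht]
      refine ih (s ++ [x]) (t ++ [x]) (by simp [hlen]) ?_
      intro y hy
      simp [hmem y (List.mem_cons_of_mem _ hy)]

-- distinct count of a :: ys = 1 + distinct count of ys with a removed
theorem setLen_cons (a : Char) (ys : List Char) :
    (PySem.Set.ofList (a :: ys)).length
      = (PySem.Set.ofList (ys.filter (fun x => !(x == a)))).length + 1 := by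
  have h0 : PySem.Set.ofList (a :: ys) = ys.foldl PySem.Set.add [a] := by
    rw [PySem.Set.ofList_eq_foldl]
    simp [List.foldl_cons, PySem.Set.add, PySem.Set.contains]
  rw [h0, foldl_add_filter_mem ys [a] a (by simp), PySem.Set.ofList_eq_foldl]
  apply foldl_add_length
  · simp
  · intro x hx
    have hne : ¬ (x == a) = true := by
      have h1 := List.of_mem_filter hx
      simpa using h1
    simp at hne
    simp [hne]

-- the central invariant: A's dict assigns to c (value d.size + rank among the chars new w.r.t. d
-- in the prefix through c's first occurrence)
theorem pstep_get?_eq (t : List Char) : ∀ (d : PySem.Dict Char Int) (c : Char),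
    d.contains c = false → c ∈ t →
    (t.foldl pstep d).get? c
      = some ((d.size : Int) +
          ((PySem.Set.ofList ((t.take ((PySem.List.index? t c).getD 0 + 1)).filter
              (fun x => !(d.contains x)))).length : Int)) := by
  induction t with
  | nil => intro d c _ h; exact absurd h (by simp)
  | cons a r ih =>
    intro d c hdc hc
    by_cases hca : c = a
    · subst hca
      rw [PySem.List.index?_cons_self]
      simp only [Option.getD_some, List.take_succ_cons, List.take_zero, List.filter_cons,
        List.filter_nil, hdc, Bool.not_false]
      have e : pstep d c = d.insert c ((d.size : Int) + 1) := by simp [pstep, hdc]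
      rw [List.foldl_cons, e,
        get?_foldl_pstep_mono r _ c (by simp),
        PySem.Dict.get?_insert_self]
      simp [PySem.Set.ofList_eq_foldl, PySem.Set.add, PySem.Set.contains]
    · have hcr : c ∈ r := by
        rcases List.mem_cons.1 hc with h | h
        · exact absurd h hca
        · exact h
      rw [PySem.List.index?_cons_of_ne r (fun h => hca h.symm)]
      have hidx : (Option.map (fun x => x + 1) (PySem.List.index? r c)).getD 0
          = (PySem.List.index? r c).getD 0 + 1 := by
        rcases h : PySem.List.index? r c with _ | k
        · exact absurd ((PySem.List.index?_eq_none_iff r c).1 h) (by simpa using hcr)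
        · simp
      rw [hidx]
      simp only [List.take_succ_cons, List.filter_cons, List.foldl_cons]
      by_cases hda : d.contains a = true
      · have e : pstep d a = d := by simp [pstep, hda]
        rw [e, ih d c hdc hcr]
        simp [hda]
      · have hfa : d.contains a = false := by simpa using hda
        have e : pstep d a = d.insert a ((d.size : Int) + 1) := by simp [pstep, hfa]
        set d' := d.insert a ((d.size : Int) + 1) with hd'
        have hd'c : d'.contains c = false := by
          rw [hd', PySem.Dict.contains_insert]
          simp [hca, hdc]
        rw [e, ih d' c hd'c hcr]
        have hsize : (d'.size : Int) = (d.size : Int) + 1 := by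
          rw [hd', PySem.Dict.size_insert, if_neg (by simp [hfa])]
          push_cast; ring
        have hfilter : (r.take ((PySem.List.index? r c).getD 0 + 1)).filter
              (fun x => !(d'.contains x))
            = ((r.take ((PySem.List.index? r c).getD 0 + 1)).filter
              (fun x => !(d.contains x))).filter (fun x => !(x == a)) := by
          rw [List.filter_filter]
          apply List.filter_congr
          intro x _
          rw [hd', PySem.Dict.contains_insert]
          cases hxa : (x == a) <;> cases hx : d.contains x <;> simp
        rw [hfilter, hsize]
        simp only [hfa, Bool.not_false, if_true]
        rw [setLen_cons]
        push_cast
        ring_nf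

-- specialisation to the empty dict: A's rank = distinct count of the prefix through c's first occurrence
theorem dict_getD_eq_setlen (l : List Char) (c : Char) (hc : c ∈ l) :
    (l.foldl pstep PySem.Dict.empty).getD c 0
      = ((PySem.Set.ofList (l.take ((PySem.List.index? l c).getD 0 + 1))).length : Int) := by
  have h := pstep_get?_eq l PySem.Dict.empty c (by simp) hc
  have hfe : (l.take ((PySem.List.index? l c).getD 0 + 1)).filter
      (fun x => !((PySem.Dict.empty : PySem.Dict Char Int).contains x))
      = l.take ((PySem.List.index? l c).getD 0 + 1) := by
    apply List.filter_eq_self.2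
    intro x _
    simp [PySem.Dict.contains_empty]
  rw [PySem.Dict.getD_eq_get?_getD, h, hfe]
  simp [PySem.Dict.size_empty]

-- A's second loop is a flatMap
theorem pnfA_loop2 (f : Char → List Char) (l : List Char) (r : List Char) :
    l.foldl (fun r i => (r ++ f i) ++ ['-']) r
      = r ++ l.flatMap (fun i => f i ++ ['-']) := by
  induction l generalizing r with
  | nil => simp
  | cons a l ih =>
    rw [List.foldl_cons, ih]
    simp [List.append_assoc]

theorem flatMap_dash_eq_join (f : Char → List Char) (l : List Char) (h : l ≠ []) :
    l.flatMap (fun i => f i ++ ['-']) = PySem.Chars.join ['-'] (l.map f) ++ ['-'] := by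
  induction l with
  | nil => exact absurd rfl h
  | cons a l ih =>
    cases l with
    | nil => simp [PySem.Chars.join_singleton]
    | cons b r =>
      rw [List.flatMap_cons, ih (by simp)]
      simp only [List.map_cons]
      rw [PySem.Chars.join_cons_cons]
      simp [List.append_assoc]

-- ===== VERDICT (by name: the statement is the Claim_ definition above) =====
theorem permutation_normal_form_spec : Claim_equal_permutation_normal_form := by
  intro s _
  unfold Spec_permutation_normal_form permutation_normal_form permutation_normal_form_alt
  dsimp only
  have hdict := pnfA_loop1_dict s.toList [] PySem.Dict.empty 1
    (by intro c; simp [PySem.Dict.contains_empty]) (by simp [PySem.Dict.size_empty])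
  rw [hdict]
  set D := s.toList.foldl pstep PySem.Dict.empty with hD
  set f : Char → List Char := fun c => PySem.Int.toChars (D.getD c 0) with hf
  have hmap : s.toList.map f = s.toList.map (fun c =>
      PySem.Int.toChars (PySem.Set.len (PySem.Set.ofList
        (PySem.List.slice s.toList none (some ((pnfB_index s.toList c : Int) + 1)))))) := by
    apply List.map_congr_left
    intro c hc
    have hslice : PySem.List.slice s.toList none (some ((pnfB_index s.toList c : Int) + 1))
        = s.toList.take (pnfB_index s.toList c + 1) := by
      have : ((pnfB_index s.toList c : Int) + 1) = ((pnfB_index s.toList c + 1 : Nat) : Int) := by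
        push_cast; ring
      rw [this, PySem.List.slice_to_natCast]
    show PySem.Int.toChars (D.getD c 0)
        = PySem.Int.toChars (PySem.Set.len (PySem.Set.ofList
            (PySem.List.slice s.toList none (some ((pnfB_index s.toList c : Int) + 1)))))
    rw [hslice, hD, dict_getD_eq_setlen s.toList c hc]
    simp [PySem.Set.len, pnfB_index]
  rw [pnfA_loop2 f s.toList []]
  cases hsl : s.toList with
  | nil =>
    simp [PySem.Chars.join_nil, PySem.List.slice]
  | cons a l =>
    rw [List.nil_append, flatMap_dash_eq_join f (a :: l) (by simp)]
    rw [← hsl, ← hmap]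
    set J := PySem.Chars.join ['-'] (s.toList.map f) with hJ
    have hlen : (((J ++ ['-']).length : Int) - 1) = ((J.length : Nat) : Int) := by
      simp
    rw [hlen, PySem.List.slice_to _ (by positivity)]
    simp
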